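-- pv_equiv track=rewrite | github.com/Futuredigits/futuredigits-bot | tools/soul_urge.py | calculate_soul_urge_number
-- ===== SOURCE A (Python) =====
-- def calculate_soul_urge_number(name: str) -> int:
--     name = name.upper()
--     vowels = {'A': 1, 'E': 5, 'I': 9, 'O': 6, 'U': 3}
--
--     total = sum(vowels.get(char, 0) for char in name if char in vowels)
--
--     def reduce(n):
--         if n in {11, 22, 33}:
--             return n
--         while n > 9:
--             n = sum(int(d) for d in str(n))
--         return n
--
--     return reduce(total)
-- ===== SOURCE B (Python) =====
-- def calculate_soul_urge_number(name: str) -> int: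
--     values = {'A': 1, 'E': 5, 'I': 9, 'O': 6, 'U': 3}
--     total = sum(values.get(c, 0) for c in name.upper())
--     if total in (11, 22, 33):
--         return total
--     return 0 if total == 0 else 1 + (total - 1) % 9
-- ===== Notes on version B (the rewrite author's own statement) =====
-- stated objective: simpler
-- what changed: The iterative repeated digit-summing while-loop is replaced by the closed-form digital root 1 + (total - 1) % 9 (0 for 0, masters 11/22/33 kept at top level only), and the redundant membership filter before the dict lookup is dropped.
import Mathlib
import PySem

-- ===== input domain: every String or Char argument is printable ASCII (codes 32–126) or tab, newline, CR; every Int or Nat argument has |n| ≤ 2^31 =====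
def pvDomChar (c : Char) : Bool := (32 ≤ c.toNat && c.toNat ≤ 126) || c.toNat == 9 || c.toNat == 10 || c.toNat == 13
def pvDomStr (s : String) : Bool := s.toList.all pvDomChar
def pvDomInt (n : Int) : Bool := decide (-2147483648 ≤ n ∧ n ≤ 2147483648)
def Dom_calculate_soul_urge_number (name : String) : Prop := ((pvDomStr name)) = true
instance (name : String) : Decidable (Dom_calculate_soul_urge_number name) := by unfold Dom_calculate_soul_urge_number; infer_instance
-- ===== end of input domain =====

-- B replaces A's repeated digit-summing while-loop by the closed-form digital root
-- 1 + (total-1) % 9 and drops the redundant membership filter before the dict lookup (simpler).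

-- ===== PORT A =====
-- the vowels dict of A
def pvVowels : PySem.Dict Char Int :=
  (((((PySem.Dict.empty).insert 'A' 1).insert 'E' 5).insert 'I' 9).insert 'O' 6).insert 'U' 3

-- int(d) for a single char d; Python raises on a non-digit char, which the loop never feeds it
def pvCharVal (d : Char) : Int := (PySem.Int.ofChars? [d]).getD 0

-- sum(int(d) for d in str(n))
def pvDigSum (n : Int) : Int := ((PySem.Int.toStr n).toList.map pvCharVal).sum

-- termination lemma for the while-loop port: the digit sum of n strictly shrinks for n > 9
theorem pvDigSum_toDigitsCore (f : Nat) : ∀ (n : Nat) (l : List Char), n < f →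
    ((Nat.toDigitsCore 10 f n l).map pvCharVal).sum
      = ((Nat.digits 10 n).sum : Int) + (l.map pvCharVal).sum := by
  induction f with
  | zero => intro n l h; omega
  | succ f ih =>
    intro n l h
    rw [Nat.toDigitsCore]
    have hcv : pvCharVal (Nat.digitChar (n % 10)) = ((n % 10 : Nat) : Int) := by
      have h10 : n % 10 < 10 := Nat.mod_lt _ (by norm_num)
      interval_cases h : (n % 10) <;> decide
    by_cases h0 : n / 10 = 0
    · have hn : n < 10 := by omega
      rcases Nat.eq_zero_or_pos n with h1 | h1
      · rw [if_pos h0]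
        subst h1
        simpa using hcv
      · rw [if_pos h0]
        rw [Nat.digits_def' (by norm_num : 1 < 10) h1, List.sum_cons, List.map_cons,
          List.sum_cons, hcv, h0]
        simp
    · rw [if_neg h0]
      have hlt : n / 10 < f := by
        have := Nat.div_lt_self (by omega : 0 < n) (by norm_num : 1 < 10)
        omega
      rw [ih (n / 10) _ hlt, List.map_cons, List.sum_cons, hcv,
        Nat.digits_def' (by norm_num : 1 < 10) (by omega : 0 < n), List.sum_cons]
      push_cast
      ring

theorem pvDigSum_eq (n : Int) (h : 0 ≤ n) :
    pvDigSum n = ((Nat.digits 10 n.toNat).sum : Int) := by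
  unfold pvDigSum
  rw [PySem.Int.toList_toStr]
  unfold PySem.Int.toChars
  rw [if_neg (by omega)]
  unfold Nat.toDigits
  rw [pvDigSum_toDigitsCore (n.toNat + 1) n.toNat [] (by omega)]
  simp

theorem pvDigSum_lt (n : Int) (h : 9 < n) : 0 ≤ pvDigSum n ∧ pvDigSum n < n := by
  rw [pvDigSum_eq n (by omega)]
  have h1 : (Nat.digits 10 n.toNat).sum ≤ n.toNat := Nat.digit_sum_le 10 n.toNat
  have h2 : n.toNat % 10 + (Nat.digits 10 (n.toNat / 10)).sum = (Nat.digits 10 n.toNat).sum := by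
    rw [Nat.digits_def' (by norm_num : 1 < 10) (by omega : 0 < n.toNat)]; simp
  have h3 : (Nat.digits 10 (n.toNat / 10)).sum ≤ n.toNat / 10 := Nat.digit_sum_le 10 _
  omega

-- 'while n > 9: n = sum(int(d) for d in str(n))'
def pvReduceLoop (n : Int) : Int :=
  if h : 9 < n then pvReduceLoop (pvDigSum n) else n
termination_by n.toNat
decreasing_by
  have := pvDigSum_lt n h
  omega

-- 'def reduce(n): if n in {11,22,33}: return n; while ...; return n'
def pvReduce (n : Int) : Int :=
  if n = 11 ∨ n = 22 ∨ n = 33 then n else pvReduceLoop n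

def calculate_soul_urge_number (name : String) : Int :=
  let up := PySem.Str.upper name
  let total := ((up.toList.filter (fun c => pvVowels.contains c)).map
    (fun c => pvVowels.getD c 0)).sum
  pvReduce total

-- ===== PORT B =====
def calculate_soul_urge_number_alt (name : String) : Int :=
  let up := PySem.Str.upper name
  let total := (up.toList.map (fun c => pvVowels.getD c 0)).sum
  if total = 11 ∨ total = 22 ∨ total = 33 then total
  else if total = 0 then 0 else 1 + PySem.Int.mod (total - 1) 9

-- ===== PRECONDITION & SPEC =====
def Spec_calculate_soul_urge_number (name : String) (out : Int) : Prop := out = calculate_soul_urge_number_alt name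
instance (name : String) (out : Int) : Decidable (Spec_calculate_soul_urge_number name out) := by unfold Spec_calculate_soul_urge_number; infer_instance

-- ===== CLAIM (what is proved, stated in full; the proofs are below) =====
def Claim_equal_calculate_soul_urge_number : Prop := ∀ (name : String), Dom_calculate_soul_urge_number name → Spec_calculate_soul_urge_number name (calculate_soul_urge_number name)

-- ===== LEMMAS AND PROOFS =====

-- pvVowels as explicit case analysis
theorem pvVowels_getD (c : Char) : pvVowels.getD c 0 =
    if c = 'A' then 1 else if c = 'E' then 5 else if c = 'I' then 9
    else if c = 'O' then 6 else if c = 'U' then 3 else 0 := by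
  have h : pvVowels = { items := [('A',1),('E',5),('I',9),('O',6),('U',3)] } := by decide
  rw [h]
  simp only [PySem.Dict.getD, PySem.Dict.get?, List.find?]
  rcases Decidable.em (c = 'A') with h1 | h1 <;>
  rcases Decidable.em (c = 'E') with h2 | h2 <;>
  rcases Decidable.em (c = 'I') with h3 | h3 <;>
  rcases Decidable.em (c = 'O') with h4 | h4 <;>
  rcases Decidable.em (c = 'U') with h5 | h5 <;>
  first
  | (rw [show ('A' == c) = false from beq_eq_false_iff_ne.mpr (fun he => h1 he.symm),
        show ('E' == c) = false from beq_eq_false_iff_ne.mpr (fun he => h2 he.symm),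
        show ('I' == c) = false from beq_eq_false_iff_ne.mpr (fun he => h3 he.symm),
        show ('O' == c) = false from beq_eq_false_iff_ne.mpr (fun he => h4 he.symm),
        show ('U' == c) = false from beq_eq_false_iff_ne.mpr (fun he => h5 he.symm)]
     simp [h1, h2, h3, h4, h5])
  | simp_all [eq_comm]

theorem pvVowels_contains (c : Char) : (pvVowels.contains c = true) =
    (c = 'A' ∨ c = 'E' ∨ c = 'I' ∨ c = 'O' ∨ c = 'U') := by
  have h : pvVowels = { items := [('A',1),('E',5),('I',9),('O',6),('U',3)] } := by decide
  rw [h]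
  simp only [PySem.Dict.contains, List.any_cons, List.any_nil, Bool.or_eq_true, beq_iff_eq,
    Bool.or_false, eq_iff_iff]
  tauto

-- dropping the membership filter does not change the sum: absent keys contribute 0
theorem pvFilter_sum (l : List Char) :
    ((l.filter (fun c => pvVowels.contains c)).map (fun c => pvVowels.getD c 0)).sum
      = (l.map (fun c => pvVowels.getD c 0)).sum := by
  induction l with
  | nil => rfl
  | cons c l ih =>
    by_cases h : pvVowels.contains c = true
    · simp [List.filter_cons, h, ih]
    · have h0 : pvVowels.getD c 0 = 0 := by
        rw [pvVowels_getD]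
        rw [pvVowels_contains] at h
        push_neg at h
        obtain ⟨h1, h2, h3, h4, h5⟩ := h
        simp [h1, h2, h3, h4, h5]
      simp [List.filter_cons, h, ih, h0]

-- each vowel value is nonnegative, so the total is nonnegative
theorem pvTotal_nonneg (l : List Char) : 0 ≤ (l.map (fun c => pvVowels.getD c 0)).sum := by
  induction l with
  | nil => simp
  | cons c l ih =>
    have h : 0 ≤ pvVowels.getD c 0 := by
      rw [pvVowels_getD]; split_ifs <;> norm_num
    simp only [List.map_cons, List.sum_cons]
    omega

theorem pvDigSum_mod9 (n : Int) (h : 0 ≤ n) : pvDigSum n % 9 = n % 9 := by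
  rw [pvDigSum_eq n h]
  have := (Nat.modEq_nine_digits_sum n.toNat).symm
  have h2 : ((Nat.digits 10 n.toNat).sum : Int) % 9 = ((n.toNat : Int)) % 9 := by
    have := Nat.ModEq.dvd this
    omega
  rw [h2]
  omega

theorem pvDigSum_pos (n : Int) (h : 9 < n) : 0 < pvDigSum n := by
  rw [pvDigSum_eq n (by omega)]
  have h2 : n.toNat % 10 + (Nat.digits 10 (n.toNat / 10)).sum = (Nat.digits 10 n.toNat).sum := by
    rw [Nat.digits_def' (by norm_num : 1 < 10) (by omega : 0 < n.toNat)]; simp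
  rcases Nat.eq_zero_or_pos (n.toNat % 10) with h3 | h3
  · have h4 : 9 < n.toNat / 10 * 10 := by omega
    have h5 : 0 < (Nat.digits 10 (n.toNat / 10)).sum := by
      have h6 : (Nat.digits 10 (n.toNat / 10)) ≠ [] := by
        rw [Nat.digits_def' (by norm_num : 1 < 10) (by omega : 0 < n.toNat / 10)]
        simp
      rcases Nat.eq_zero_or_pos ((Nat.digits 10 (n.toNat / 10)).sum) with h7 | h7
      · exfalso
        have h8 := Nat.modEq_nine_digits_sum (n.toNat / 10)
        have h9 := Nat.digit_sum_le 10 (n.toNat / 10)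
        -- all-zero digit sum forces the number ≡ 0 mod 9; instead use: sum = 0 → head digit 0 and rec
        -- simpler: digits of m>0 end in a nonzero digit, so the sum is positive
        have h10 := Nat.getLast_digit_ne_zero 10 (by omega : n.toNat / 10 ≠ 0)
        have h11 : (Nat.digits 10 (n.toNat / 10)).getLast h6 ∈ Nat.digits 10 (n.toNat / 10) :=
          List.getLast_mem h6
        have h12 := List.single_le_sum (by intro x _; omega) _ h11
        omega
      · exact h7
    omega
  · omega

-- the while loop computes the digital root
theorem pvReduceLoop_eq (n : Int) (h : 0 ≤ n) :
    pvReduceLoop n = if n = 0 then 0 else 1 + PySem.Int.mod (n - 1) 9 := by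
  rw [pvReduceLoop]
  split_ifs with h1 h2
  · omega
  · -- n > 9: recurse on the digit sum
    have hlt := pvDigSum_lt n h1
    have hpos := pvDigSum_pos n h1
    have hmod := pvDigSum_mod9 n (by omega)
    rw [pvReduceLoop_eq (pvDigSum n) (by omega)]
    rw [if_neg (by omega)]
    simp only [PySem.Int.mod, Int.fmod_eq_emod]
    omega
  · omega
  · -- 0 < n ≤ 9: the digital root is n itself
    simp only [PySem.Int.mod, Int.fmod_eq_emod]
    omega
termination_by n.toNat
decreasing_by
  have := pvDigSum_lt n h1
  omega

-- ===== VERDICT (by name: the statement is the Claim_ definition above) =====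
theorem calculate_soul_urge_number_spec : Claim_equal_calculate_soul_urge_number := by
  intro name _
  unfold Spec_calculate_soul_urge_number calculate_soul_urge_number calculate_soul_urge_number_alt
  simp only [pvFilter_sum]
  set t := (((PySem.Str.upper name).toList).map (fun c => pvVowels.getD c 0)).sum with ht
  have hnn : 0 ≤ t := pvTotal_nonneg _
  unfold pvReduce
  by_cases h1 : t = 11 ∨ t = 22 ∨ t = 33
  · rw [if_pos h1, if_pos h1]
  · rw [if_neg h1, if_neg h1, pvReduceLoop_eq t hnn]
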